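-- pv_equiv track=rewrite | github.com/Fudi223/PythonHomework | rosalind_data/advent_2.py | is_valid_range
-- ===== SOURCE A (Python) =====
-- def is_valid_range(line):
--   """Checks if a line representing a range of numbers has gaps <= 3."""
--
--   numbers = [int(x) for x in line.split()]
--
--   if len(numbers) < 2:
--     return False  # Not enough numbers to check
--
--   is_ascending = numbers[1] > numbers[0]  # Determine initial direction
--
--   for i in range(1, len(numbers)):
--     gap = abs(numbers[i] - numbers[i - 1])  # Calculate absolute gap
--     if gap > 3:
--       return False  # Gap too large
--
--     if is_ascending and numbers[i] <= numbers[i-1]: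
--       return False  # Violated ascending order
--     elif not is_ascending and numbers[i] >= numbers[i-1]:
--       return False  # Violated descending order
--
--   return True  # All checks passed
-- ===== SOURCE B (Python) =====
-- def is_valid_range(line):
--   """Checks if a line representing a range of numbers has gaps <= 3."""
--   numbers = [int(x) for x in line.split()]
--   if len(numbers) < 2:
--     return False
--   diffs = [b - a for a, b in zip(numbers, numbers[1:])]
--   return all(1 <= d <= 3 for d in diffs) or all(-3 <= d <= -1 for d in diffs)
-- ===== Notes on version B (the rewrite author's own statement) =====
-- stated objective: simpler
-- what changed: Replaces A's single interleaved direction-tracking loop with early returns by a consecutive-difference table followed by two whole-list predicates: all diffs in [1,3] or all diffs in [-3,-1].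
-- outside the precondition, e.g. on is_valid_range('1 two 3'): A raises ValueError, B raises ValueError
import Mathlib
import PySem

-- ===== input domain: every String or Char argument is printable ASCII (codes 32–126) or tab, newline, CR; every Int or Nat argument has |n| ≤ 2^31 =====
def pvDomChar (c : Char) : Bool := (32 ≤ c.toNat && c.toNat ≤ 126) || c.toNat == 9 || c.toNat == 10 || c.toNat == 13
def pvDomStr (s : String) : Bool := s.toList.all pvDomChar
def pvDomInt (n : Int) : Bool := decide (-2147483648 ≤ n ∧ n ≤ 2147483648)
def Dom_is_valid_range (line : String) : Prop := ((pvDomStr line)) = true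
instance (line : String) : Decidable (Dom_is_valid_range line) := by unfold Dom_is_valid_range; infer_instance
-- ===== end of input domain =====

-- B replaces A's interleaved direction-tracking loop by a consecutive-difference table and
-- two whole-list range predicates (same values on all inputs where A returns; objective: simpler).


-- ===== PORT A =====
-- shared by both ports: [int(x) for x in line.split()]; none = some token raises ValueError
def pvParseAll (ts : List String) : Option (List Int) :=
  match ts with
  | [] => some []
  | t :: ts' =>
    match PySem.Int.ofStr? t with
    | none => none
    | some n =>
      match pvParseAll ts' with
      | none => none
      | some ns => some (n :: ns)

-- A's for-loop over i = 1 .. len-1, carried as (previous element, rest), with early returns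
def pvLoopA (asc : Bool) (prev : Int) (rest : List Int) : Bool :=
  match rest with
  | [] => true
  | n :: rs =>
    if 3 < (n - prev).natAbs then false
    else if asc && decide (n ≤ prev) then false
    else if !asc && decide (prev ≤ n) then false
    else pvLoopA asc n rs

def is_valid_range (line : String) : Bool :=
  match pvParseAll (PySem.Str.split₀ line) with
  | none => false   -- unreachable under Pre_ (Python raises ValueError here)
  | some numbers =>
    match numbers with
    | n0 :: n1 :: rest => pvLoopA (decide (n0 < n1)) n0 (n1 :: rest)
    | _ => false      -- len(numbers) < 2

-- ===== PORT B =====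
def is_valid_range_alt (line : String) : Bool :=
  match pvParseAll (PySem.Str.split₀ line) with
  | none => false   -- unreachable under Pre_ (Python raises ValueError here)
  | some numbers =>
    if numbers.length < 2 then false
    else
      let diffs := (numbers.zip numbers.tail).map (fun p => p.2 - p.1)
      diffs.all (fun d => decide (1 ≤ d) && decide (d ≤ 3)) ||
        diffs.all (fun d => decide (-3 ≤ d) && decide (d ≤ -1))

-- ===== PRECONDITION & SPEC =====
-- Pre_ excludes exactly the lines with a whitespace-separated token that int() rejects (Python raises ValueError there).
def Pre_is_valid_range (line : String) : Prop :=
  ∀ t ∈ PySem.Str.split₀ line, (PySem.Int.ofStr? t).isSome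
instance (line : String) : Decidable (Pre_is_valid_range line) := by unfold Pre_is_valid_range; infer_instance
def pvWitness_is_valid_range : String := "1 2 4"

def Spec_is_valid_range (line : String) (out : Bool) : Prop := out = is_valid_range_alt line
instance (line : String) (out : Bool) : Decidable (Spec_is_valid_range line out) := by unfold Spec_is_valid_range; infer_instance

-- ===== CLAIM (what is proved, stated in full; the proofs are below) =====
def Claim_equal_is_valid_range : Prop := ∀ (line : String), Dom_is_valid_range line → Pre_is_valid_range line → Spec_is_valid_range line (is_valid_range line)

-- ===== LEMMAS AND PROOFS =====

lemma pvLoopA_asc (p : Int) (rs : List Int) :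
    pvLoopA true p rs
      = (((p :: rs).zip rs).map (fun q => q.2 - q.1)).all
          (fun d => decide (1 ≤ d) && decide (d ≤ 3)) := by
  induction rs generalizing p with
  | nil => simp [pvLoopA]
  | cons n rs ih =>
    simp only [pvLoopA, List.zip_cons_cons, List.map_cons, List.all_cons]
    rw [ih]
    by_cases h : 1 ≤ n - p ∧ n - p ≤ 3
    · have h1 : ¬ 3 < (n - p).natAbs := by omega
      have h2 : ¬ n ≤ p := by omega
      simp [h1, h2, h.1, h.2]
    · by_cases h1 : 3 < (n - p).natAbs
      · have : ¬ (1 ≤ n - p ∧ n - p ≤ 3) := h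
        simp only [h1, if_true]
        rcases (by omega : ¬ 1 ≤ n - p ∨ ¬ n - p ≤ 3) with h' | h' <;> simp [h']
      · have h2 : n ≤ p := by omega
        have h3 : ¬ 1 ≤ n - p := by omega
        simp [h1, h2, h3]

lemma pvLoopA_desc (p : Int) (rs : List Int) :
    pvLoopA false p rs
      = (((p :: rs).zip rs).map (fun q => q.2 - q.1)).all
          (fun d => decide (-3 ≤ d) && decide (d ≤ -1)) := by
  induction rs generalizing p with
  | nil => simp [pvLoopA]
  | cons n rs ih =>
    simp only [pvLoopA, List.zip_cons_cons, List.map_cons, List.all_cons]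
    rw [ih]
    by_cases h : -3 ≤ n - p ∧ n - p ≤ -1
    · have h1 : ¬ 3 < (n - p).natAbs := by omega
      have h2 : ¬ p ≤ n := by omega
      simp [h1, h2, h.1, h.2]
    · by_cases h1 : 3 < (n - p).natAbs
      · simp only [h1, if_true]
        rcases (by omega : ¬ -3 ≤ n - p ∨ ¬ n - p ≤ -1) with h' | h' <;> simp [h']
      · have h2 : p ≤ n := by omega
        have h3 : ¬ n - p ≤ -1 := by omega
        simp [h1, h2, h3]

-- ===== VERDICT (by name: the statement is the Claim_ definition above) =====
theorem is_valid_range_spec : Claim_equal_is_valid_range := by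
  intro line _ _
  unfold Spec_is_valid_range is_valid_range is_valid_range_alt
  cases hp : pvParseAll (PySem.Str.split₀ line) with
  | none => rfl
  | some numbers =>
    match numbers with
    | [] => rfl
    | [n0] => rfl
    | n0 :: n1 :: rest =>
      simp only [List.length_cons, List.tail_cons]
      rw [if_neg (by omega)]
      by_cases hd : n0 < n1
      · rw [decide_eq_true hd, pvLoopA_asc]
        cases hAsc : (((n0 :: n1 :: rest).zip (n1 :: rest)).map (fun q => q.2 - q.1)).all
            (fun d => decide (1 ≤ d) && decide (d ≤ 3)) with
        | true => simp only [Bool.true_or]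
        | false =>
          have hDesc : (((n0 :: n1 :: rest).zip (n1 :: rest)).map (fun q => q.2 - q.1)).all
              (fun d => decide (-3 ≤ d) && decide (d ≤ -1)) = false := by
            simp only [List.zip_cons_cons, List.map_cons, List.all_cons]
            have h' : ¬ (n1 - n0 ≤ -1) := by omega
            simp [h']
          simp only [hDesc, Bool.false_or]
      · rw [decide_eq_false hd, pvLoopA_desc]
        cases hDesc : (((n0 :: n1 :: rest).zip (n1 :: rest)).map (fun q => q.2 - q.1)).all
            (fun d => decide (-3 ≤ d) && decide (d ≤ -1)) with
        | true => simp only [Bool.or_true]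
        | false =>
          have hAsc : (((n0 :: n1 :: rest).zip (n1 :: rest)).map (fun q => q.2 - q.1)).all
              (fun d => decide (1 ≤ d) && decide (d ≤ 3)) = false := by
            simp only [List.zip_cons_cons, List.map_cons, List.all_cons]
            have h' : ¬ (1 ≤ n1 - n0) := by omega
            simp [h']
          simp only [hAsc, Bool.or_false]
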